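-- pv_equiv track=rewrite | github.com/eucalypto/bitesofpy | 29/wrong_char.py | get_index_different_char
-- ===== SOURCE A (Python) =====
-- def get_index_different_char(chars):
--     chars = [str(char) for char in chars]
--     alphanumerics = list("abcdefghijklmnopqrstuvwxyzABCDEFGHIJKLMNOPQRSTUVWXYZ0123456789")
--     count_of_alphanumerics = 0
--     count_of_non_alphanumerics = 0
--     for char in chars:
--         if char in alphanumerics:
--             count_of_alphanumerics += 1
--         else:
--             count_of_non_alphanumerics += 1
--     look_for_alphanumeric = None
--     if count_of_alphanumerics == 1:
--         look_for_alphanumeric = True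
--     elif count_of_non_alphanumerics == 1:
--         look_for_alphanumeric = False
--     else:
--         message = f"This should never be reached. Maybe both categories have more than 1 entries? alphanumeric: {count_of_alphanumerics} non-alpha: {count_of_non_alphanumerics}"
--         raise AssertionError(message)
--
--     for index, char in enumerate(chars):
--         if look_for_alphanumeric == (char in alphanumerics):
--             return index
-- ===== SOURCE B (Python) =====
-- def get_index_different_char(chars):
--     alphanumerics = set("abcdefghijklmnopqrstuvwxyzABCDEFGHIJKLMNOPQRSTUVWXYZ0123456789")
--     alnum_indices = []
--     other_indices = []
--     for index, char in enumerate(chars):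
--         if str(char) in alphanumerics:
--             alnum_indices.append(index)
--         else:
--             other_indices.append(index)
--     if len(alnum_indices) == 1:
--         return alnum_indices[0]
--     if len(other_indices) == 1:
--         return other_indices[0]
--     message = f"This should never be reached. Maybe both categories have more than 1 entries? alphanumeric: {len(alnum_indices)} non-alpha: {len(other_indices)}"
--     raise AssertionError(message)
-- ===== Notes on version B (the rewrite author's own statement) =====
-- stated objective: simpler
-- what changed: Replaces A's count-then-rescan two-pass structure (count both categories, then a second enumerate loop searching for the chosen category) by a single partitioning pass that collects the indices of each category into two lists and returns the singleton bucket's element.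
import Mathlib
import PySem

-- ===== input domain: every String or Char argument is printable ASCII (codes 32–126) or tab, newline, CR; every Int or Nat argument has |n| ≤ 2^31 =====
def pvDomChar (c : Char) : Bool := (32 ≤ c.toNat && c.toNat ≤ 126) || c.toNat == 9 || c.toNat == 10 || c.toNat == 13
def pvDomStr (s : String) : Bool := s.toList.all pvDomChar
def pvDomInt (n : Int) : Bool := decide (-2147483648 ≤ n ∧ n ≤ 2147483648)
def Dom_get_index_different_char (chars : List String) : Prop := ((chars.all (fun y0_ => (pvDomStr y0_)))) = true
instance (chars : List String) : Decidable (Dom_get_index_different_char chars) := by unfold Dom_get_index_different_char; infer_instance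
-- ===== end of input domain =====

-- B differs from A only in structure (one partitioning pass instead of count-then-rescan); return values proved equal on Pre_.

-- ===== PORT A =====
-- list("abc…9") : the 62 one-character alphanumeric strings; 'char in alphanumerics' is membership here
def pvAlphanumerics : List String :=
  "abcdefghijklmnopqrstuvwxyzABCDEFGHIJKLMNOPQRSTUVWXYZ0123456789".toList.map
    (fun c => String.ofList [c])

def pvIsAl (s : String) : Bool := pvAlphanumerics.contains s

-- second loop of A: first index (from i) whose membership equals the sought category; Python returns None if none (unreachable under Pre_), ported as -1
def pvFindIdx (b : Bool) : Int → List String → Int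
  | _, [] => -1
  | i, c :: rest => if b == pvIsAl c then i else pvFindIdx b (i + 1) rest

def get_index_different_char (chars : List String) : Int :=
  -- chars = [str(c) for c in chars] is the identity on List String
  let counts := chars.foldl
    (fun (p : Int × Int) c => if pvIsAl c then (p.1 + 1, p.2) else (p.1, p.2 + 1)) (0, 0)
  if counts.1 = 1 then pvFindIdx true 0 chars
  else if counts.2 = 1 then pvFindIdx false 0 chars
  else -1  -- Python raises AssertionError here (outside Pre_)

-- ===== PORT B =====
def get_index_different_char_alt (chars : List String) : Int :=
  let p := (PySem.List.enumerate chars).foldl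
    (fun (acc : List Int × List Int) ic =>
      if pvIsAl ic.2 then (acc.1 ++ [ic.1], acc.2) else (acc.1, acc.2 ++ [ic.1]))
    ([], [])
  if p.1.length = 1 then p.1.headD 0
  else if p.2.length = 1 then p.2.headD 0
  else -1  -- Python raises AssertionError here (outside Pre_)

-- ===== PRECONDITION & SPEC =====
-- Pre_ excludes exactly the inputs on which A (and B) raise AssertionError: neither category has exactly one member
def Pre_get_index_different_char (chars : List String) : Prop :=
  chars.countP pvIsAl = 1 ∨ chars.countP (fun c => !pvIsAl c) = 1
instance (chars : List String) : Decidable (Pre_get_index_different_char chars) := by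
  unfold Pre_get_index_different_char; infer_instance

def pvWitness_get_index_different_char : List String := ["a", "!", "?"]

def Spec_get_index_different_char (chars : List String) (out : Int) : Prop := out = get_index_different_char_alt chars
instance (chars : List String) (out : Int) : Decidable (Spec_get_index_different_char chars out) := by unfold Spec_get_index_different_char; infer_instance

-- ===== CLAIM (what is proved, stated in full; the proofs are below) =====
def Claim_equal_get_index_different_char : Prop := ∀ (chars : List String), Dom_get_index_different_char chars → Pre_get_index_different_char chars → Spec_get_index_different_char chars (get_index_different_char chars)

-- ===== LEMMAS AND PROOFS =====

-- the index list B collects for category b, starting enumeration at i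
def pvBucket (b : Bool) (i : Int) (chars : List String) : List Int :=
  ((PySem.List.enumerate chars i).filter (fun ic => pvIsAl ic.2 == b)).map (·.1)

theorem pvBucket_nil (b : Bool) (i : Int) : pvBucket b i [] = [] := by
  simp [pvBucket, PySem.List.enumerate_nil]

theorem pvBucket_cons (b : Bool) (i : Int) (c : String) (rest : List String) :
    pvBucket b i (c :: rest) =
      (if pvIsAl c == b then [i] else []) ++ pvBucket b (i + 1) rest := by
  by_cases h : pvIsAl c = b
  · simp [pvBucket, PySem.List.enumerate_cons, h]
  · have hb : (pvIsAl c == b) = false := by simp [h]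
    simp [pvBucket, PySem.List.enumerate_cons, hb]

theorem pvBucket_length (b : Bool) (i : Int) (chars : List String) :
    (pvBucket b i chars).length = chars.countP (fun c => pvIsAl c == b) := by
  induction chars generalizing i with
  | nil => simp [pvBucket_nil]
  | cons c rest ih =>
    rw [pvBucket_cons]
    by_cases h : pvIsAl c = b <;> simp [h, ih]

theorem pvFindIdx_eq_bucket (b : Bool) (i : Int) (chars : List String) :
    pvFindIdx b i chars = ((pvBucket b i chars).head?).getD (-1) := by
  induction chars generalizing i with
  | nil => simp [pvFindIdx, pvBucket_nil]
  | cons c rest ih =>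
    rw [pvBucket_cons]
    by_cases h : pvIsAl c = b
    · simp [pvFindIdx, h]
    · have hb : (b == pvIsAl c) = false := by
        cases b <;> cases hc : pvIsAl c <;> simp_all
      simp [pvFindIdx, h, hb, ih]

theorem pvFold_eq_bucket (chars : List String) (i : Int) (xs ys : List Int) :
    (PySem.List.enumerate chars i).foldl
      (fun (acc : List Int × List Int) ic =>
        if pvIsAl ic.2 then (acc.1 ++ [ic.1], acc.2) else (acc.1, acc.2 ++ [ic.1]))
      (xs, ys)
    = (xs ++ pvBucket true i chars, ys ++ pvBucket false i chars) := by
  induction chars generalizing i xs ys with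
  | nil => simp [pvBucket_nil, PySem.List.enumerate_nil]
  | cons c rest ih =>
    rw [PySem.List.enumerate_cons]
    by_cases h : pvIsAl c = true
    · simp [List.foldl_cons, h, ih, pvBucket_cons, List.append_assoc]
    · simp at h
      simp [List.foldl_cons, h, ih, pvBucket_cons, List.append_assoc]

theorem pvCounts (chars : List String) (a bb : Int) :
    chars.foldl
      (fun (p : Int × Int) c => if pvIsAl c then (p.1 + 1, p.2) else (p.1, p.2 + 1)) (a, bb)
    = (a + chars.countP pvIsAl, bb + chars.countP (fun c => !pvIsAl c)) := by
  induction chars generalizing a bb with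
  | nil => simp
  | cons c rest ih =>
    by_cases h : pvIsAl c = true <;>
      simp [List.foldl_cons, h, ih] <;> ring_nf

-- ===== VERDICT (by name: the statement is the Claim_ definition above) =====
theorem get_index_different_char_spec : Claim_equal_get_index_different_char := by
  intro chars _ hpre
  unfold Spec_get_index_different_char get_index_different_char get_index_different_char_alt
  rw [pvCounts, pvFold_eq_bucket]
  simp only [List.nil_append, Int.zero_add]
  have hlt : (pvBucket true 0 chars).length = chars.countP pvIsAl := by
    rw [pvBucket_length]; exact List.countP_congr (fun c _ => by simp)
  have hlf : (pvBucket false 0 chars).length = chars.countP (fun c => !pvIsAl c) := by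
    rw [pvBucket_length]; exact List.countP_congr (fun c _ => by simp)
  by_cases hA : chars.countP pvIsAl = 1
  · have h1 : (chars.countP pvIsAl : Int) = 1 := by exact_mod_cast hA
    have hl1 : (pvBucket true 0 chars).length = 1 := by omega
    simp only [h1, hl1]
    rw [pvFindIdx_eq_bucket]
    cases hb : pvBucket true 0 chars with
    | nil => rw [hb] at hl1; simp at hl1
    | cons k t => simp
  · have h1 : ¬ ((chars.countP pvIsAl : Int) = 1) := by exact_mod_cast hA
    have hN : chars.countP (fun c => !pvIsAl c) = 1 := by
      rcases hpre with h | h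
      · exact absurd h hA
      · exact h
    have h2 : (chars.countP (fun c => !pvIsAl c) : Int) = 1 := by exact_mod_cast hN
    have hl0 : ¬ ((pvBucket true 0 chars).length = 1) := by omega
    have hl1 : (pvBucket false 0 chars).length = 1 := by omega
    simp only [if_neg h1, if_neg hl0, h2, hl1]
    rw [pvFindIdx_eq_bucket]
    cases hb : pvBucket false 0 chars with
    | nil => rw [hb] at hl1; simp at hl1
    | cons k t => simp
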